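-- pv_equiv track=rewrite | github.com/amritonlineshopping-eng/tradingoptionradar | scanner.py | _reason
-- ===== SOURCE A (Python) =====
-- def _reason(impact, bull, bear):
--     if impact == "BULLISH":
--         if any(k in bull for k in ["rate cut","repo cut"]): return "Rate cut = positive for earnings"
--         if "fii buying" in bull: return "FII inflows = buying pressure"
--         if any(k in bull for k in ["crude falls","oil drops"]): return "Lower crude = positive for India"
--         return "Positive trigger for Indian market"
--     if impact == "BEARISH":
--         if any(k in bear for k in ["hawkish","rate hike"]): return "Hawkish Fed = FII outflows"
--         if any(k in bear for k in ["crude rises","oil jumps"]): return "Higher crude = India import costs"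
--         if "fii selling" in bear: return "FII outflows = selling pressure"
--         return "Negative trigger for Indian market"
--     return "Monitoring for impact"
-- ===== SOURCE B (Python) =====
-- # B: flat keyword->rule-index table; select the reason whose rule index is the
-- # minimum over all matched keywords (min-index selection instead of an ordered
-- # first-match branch chain); index 3 (never assigned to a keyword) is the fallback.
-- _TABLE = {
--     "BULLISH": (
--         [("rate cut", 0), ("repo cut", 0), ("fii buying", 1),
--          ("crude falls", 2), ("oil drops", 2)],
--         ["Rate cut = positive for earnings", "FII inflows = buying pressure",
--          "Lower crude = positive for India", "Positive trigger for Indian market"],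
--     ),
--     "BEARISH": (
--         [("hawkish", 0), ("rate hike", 0), ("crude rises", 1),
--          ("oil jumps", 1), ("fii selling", 2)],
--         ["Hawkish Fed = FII outflows", "Higher crude = India import costs",
--          "FII outflows = selling pressure", "Negative trigger for Indian market"],
--     ),
-- }
--
-- def _reason(impact, bull, bear):
--     entry = _TABLE.get(impact)
--     if entry is None:
--         return "Monitoring for impact"
--     pairs, reasons = entry
--     text = bull if impact == "BULLISH" else bear
--     idx = min((i for kw, i in pairs if kw in text), default=len(reasons) - 1)
--     return reasons[idx]
-- ===== Notes on version B (the rewrite author's own statement) =====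
-- stated objective: alternative
-- what changed: Replaced A's ordered if/elif first-match chains with a flat keyword-to-rule-index table: B collects the rule indices of all matching keywords and returns reasons[min(indices)] (arithmetic minimum selection, fallback index when none match), instead of short-circuiting branch control flow.
import Mathlib
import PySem

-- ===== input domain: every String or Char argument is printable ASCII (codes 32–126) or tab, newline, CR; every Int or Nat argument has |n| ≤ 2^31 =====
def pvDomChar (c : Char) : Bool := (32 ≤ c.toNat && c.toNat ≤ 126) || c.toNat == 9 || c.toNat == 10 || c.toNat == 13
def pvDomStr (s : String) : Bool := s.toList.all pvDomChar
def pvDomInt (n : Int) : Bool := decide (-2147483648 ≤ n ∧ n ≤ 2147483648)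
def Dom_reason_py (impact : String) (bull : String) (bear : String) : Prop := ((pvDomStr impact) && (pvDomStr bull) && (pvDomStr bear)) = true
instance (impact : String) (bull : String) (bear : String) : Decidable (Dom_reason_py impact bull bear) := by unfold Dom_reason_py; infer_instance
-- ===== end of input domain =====

-- B replaces A's ordered if/elif first-match chains by a flat keyword->rule-index table with arithmetic minimum-index selection (objective: alternative).


-- ===== PORT A =====
def reason_py (impact : String) (bull : String) (bear : String) : String :=
  if impact == "BULLISH" then
    if ["rate cut", "repo cut"].any (fun k => PySem.Str.isIn k bull) then "Rate cut = positive for earnings"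
    else if PySem.Str.isIn "fii buying" bull then "FII inflows = buying pressure"
    else if ["crude falls", "oil drops"].any (fun k => PySem.Str.isIn k bull) then "Lower crude = positive for India"
    else "Positive trigger for Indian market"
  else if impact == "BEARISH" then
    if ["hawkish", "rate hike"].any (fun k => PySem.Str.isIn k bear) then "Hawkish Fed = FII outflows"
    else if ["crude rises", "oil jumps"].any (fun k => PySem.Str.isIn k bear) then "Higher crude = India import costs"
    else if PySem.Str.isIn "fii selling" bear then "FII outflows = selling pressure"
    else "Negative trigger for Indian market"
  else "Monitoring for impact"

-- ===== PORT B =====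
-- the module-level _TABLE of Source B: impact -> (flat (keyword, rule index) list, reasons array; last reason = fallback)
def pvTable : PySem.Dict String (List (String × Int) × List String) :=
  PySem.Dict.mk
    [("BULLISH",
       ([("rate cut", 0), ("repo cut", 0), ("fii buying", 1), ("crude falls", 2), ("oil drops", 2)],
        ["Rate cut = positive for earnings", "FII inflows = buying pressure",
         "Lower crude = positive for India", "Positive trigger for Indian market"])),
     ("BEARISH",
       ([("hawkish", 0), ("rate hike", 0), ("crude rises", 1), ("oil jumps", 1), ("fii selling", 2)],
        ["Hawkish Fed = FII outflows", "Higher crude = India import costs",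
         "FII outflows = selling pressure", "Negative trigger for Indian market"]))]

def reason_py_alt (impact : String) (bull : String) (bear : String) : String :=
  match PySem.Dict.get? pvTable impact with
  | none => "Monitoring for impact"
  | some (pairs, reasons) =>
      let text := if impact == "BULLISH" then bull else bear
      -- min((i for kw, i in pairs if kw in text), default=len(reasons)-1)
      let idx := PySem.List.minD ((pairs.filter (fun p => PySem.Str.isIn p.1 text)).map Prod.snd)
                   (fun i => i) ((reasons.length : Int) - 1)
      -- reasons[idx]: idx is always in range here, so pyGetD's default is never produced
      PySem.List.pyGetD reasons idx ""

-- ===== PRECONDITION & SPEC =====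
def Spec_reason_py (impact : String) (bull : String) (bear : String) (out : String) : Prop := out = reason_py_alt impact bull bear
instance (impact : String) (bull : String) (bear : String) (out : String) : Decidable (Spec_reason_py impact bull bear out) := by unfold Spec_reason_py; infer_instance

-- ===== CLAIM (what is proved, stated in full; the proofs are below) =====
def Claim_equal_reason_py : Prop := ∀ (impact : String) (bull : String) (bear : String), Dom_reason_py impact bull bear → Spec_reason_py impact bull bear (reason_py impact bull bear)

-- ===== LEMMAS AND PROOFS =====

-- ===== VERDICT (by name: the statement is the Claim_ definition above) =====
theorem reason_py_spec : Claim_equal_reason_py := by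
  intro impact bull bear _
  unfold Spec_reason_py reason_py reason_py_alt
  by_cases h1 : impact = "BULLISH"
  · subst h1
    simp only [pvTable, PySem.Dict.get?, BEq.rfl, if_true]
    by_cases k1 : PySem.Str.isIn "rate cut" bull <;>
    by_cases k2 : PySem.Str.isIn "repo cut" bull <;>
    by_cases k3 : PySem.Str.isIn "fii buying" bull <;>
    by_cases k4 : PySem.Str.isIn "crude falls" bull <;>
    by_cases k5 : PySem.Str.isIn "oil drops" bull <;>
      simp_all [PySem.Str.isIn, PySem.List.minD, PySem.List.min?, PySem.List.pyGetD, PySem.List.pyGet?, PySem.List.pyIdx?, List.filter]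
  · by_cases h2 : impact = "BEARISH"
    · subst h2
      simp only [pvTable, PySem.Dict.get?]
      by_cases k1 : PySem.Str.isIn "hawkish" bear <;>
      by_cases k2 : PySem.Str.isIn "rate hike" bear <;>
      by_cases k3 : PySem.Str.isIn "crude rises" bear <;>
      by_cases k4 : PySem.Str.isIn "oil jumps" bear <;>
      by_cases k5 : PySem.Str.isIn "fii selling" bear <;>
        simp_all [PySem.Str.isIn, PySem.List.minD, PySem.List.min?, PySem.List.pyGetD, PySem.List.pyGet?, PySem.List.pyIdx?, List.filter]
    · simp [pvTable, PySem.Dict.get?, h1, h2, Ne.symm h1, Ne.symm h2]
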